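-- pv_equiv track=rewrite | github.com/TeodorGlobalworth/MeteringGraph | app/utils/csv_parser.py | preprocess_csv_content
-- ===== SOURCE A (Python) =====
-- def preprocess_csv_content(csv_content):
--     """
--     Remove comment lines (starting with #) from CSV content.
--     This allows users to include instructions in the CSV file.
--     """
--     lines = csv_content.split('\n')
--     filtered_lines = []
--
--     for line in lines:
--         stripped = line.strip()
--         # Skip comment lines (starting with #)
--         if stripped.startswith('#'):
--             continue
--         # Skip completely empty lines before header is found
--         if not stripped and not filtered_lines:
--             continue
--         filtered_lines.append(line)
--
--     return '\n'.join(filtered_lines)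
-- ===== SOURCE B (Python) =====
-- def preprocess_csv_content(csv_content):
--     """
--     Remove comment lines (starting with #) from CSV content.
--     This allows users to include instructions in the CSV file.
--     """
--     non_comment = [line for line in csv_content.split('\n')
--                    if not line.strip().startswith('#')]
--     i = 0
--     while i < len(non_comment) and not non_comment[i].strip():
--         i += 1
--     return '\n'.join(non_comment[i:])
-- ===== Notes on version B (the rewrite author's own statement) =====
-- stated objective: simpler
-- what changed: Replaces A's single stateful loop (whose 'not filtered_lines' flag decides whether blank lines are kept) by two plain passes: a comprehension that filters out comment lines, then an index advance that drops the leading blank prefix, joined back.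
import Mathlib
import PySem

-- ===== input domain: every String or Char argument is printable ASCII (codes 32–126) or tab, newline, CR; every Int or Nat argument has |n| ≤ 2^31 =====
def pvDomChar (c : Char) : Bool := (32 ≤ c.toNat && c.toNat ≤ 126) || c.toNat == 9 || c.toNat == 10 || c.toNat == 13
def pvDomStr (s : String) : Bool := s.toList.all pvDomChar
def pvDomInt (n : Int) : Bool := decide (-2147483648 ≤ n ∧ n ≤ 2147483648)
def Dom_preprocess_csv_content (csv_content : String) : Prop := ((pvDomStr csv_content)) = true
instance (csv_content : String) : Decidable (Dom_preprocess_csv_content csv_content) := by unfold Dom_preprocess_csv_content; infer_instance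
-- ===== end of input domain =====

-- B replaces A's single stateful loop (whose 'not filtered_lines' flag decides whether blank lines are kept)
-- by two plain passes: filter out comment lines, then drop the leading blank prefix (objective: simpler).

-- ===== PORT A =====
-- body of A's for-loop (the two continue branches, then the append)
def pvStepA (filtered_lines : List String) (line : String) : List String :=
  let stripped := PySem.Str.strip line
  if PySem.Str.startswith stripped "#" then filtered_lines
  else if stripped == "" && filtered_lines == ([] : List String) then filtered_lines
  else filtered_lines ++ [line]

def preprocess_csv_content (csv_content : String) : String :=
  let lines := (PySem.Str.split? csv_content "\n").getD []  -- sep "\n" ≠ "", so split? is always some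
  let filtered_lines := lines.foldl pvStepA []
  PySem.Str.join "\n" filtered_lines

-- ===== PORT B =====
-- the index-advance while loop of Source B: drop lines from the front while blank, return the tail
def pvDropLeadingBlank : List String → List String
  | [] => []
  | l :: rest => if PySem.Str.strip l == "" then pvDropLeadingBlank rest else l :: rest

def preprocess_csv_content_alt (csv_content : String) : String :=
  let non_comment := ((PySem.Str.split? csv_content "\n").getD []).filter
      (fun line => !(PySem.Str.startswith (PySem.Str.strip line) "#"))
  PySem.Str.join "\n" (pvDropLeadingBlank non_comment)

-- ===== PRECONDITION & SPEC =====
def Spec_preprocess_csv_content (csv_content : String) (out : String) : Prop := out = preprocess_csv_content_alt csv_content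
instance (csv_content : String) (out : String) : Decidable (Spec_preprocess_csv_content csv_content out) := by unfold Spec_preprocess_csv_content; infer_instance

-- ===== CLAIM (what is proved, stated in full; the proofs are below) =====
def Claim_equal_preprocess_csv_content : Prop := ∀ (csv_content : String), Dom_preprocess_csv_content csv_content → Spec_preprocess_csv_content csv_content (preprocess_csv_content csv_content)

-- ===== LEMMAS AND PROOFS =====

theorem pvStepA_comment (acc : List String) (l : String)
    (hc : PySem.Str.startswith (PySem.Str.strip l) "#" = true) :
    pvStepA acc l = acc := by
  simp only [pvStepA, hc, if_true]

theorem pvStepA_keep (acc : List String) (l : String)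
    (hc : PySem.Str.startswith (PySem.Str.strip l) "#" = false) (h : acc ≠ []) :
    pvStepA acc l = acc ++ [l] := by
  have h2 : (acc == ([] : List String)) = false := beq_eq_false_iff_ne.mpr h
  simp only [pvStepA, hc, h2, Bool.and_false, Bool.false_eq_true, if_false]

theorem pvStepA_nil_blank (l : String)
    (hc : PySem.Str.startswith (PySem.Str.strip l) "#" = false)
    (hb : (PySem.Str.strip l == "") = true) :
    pvStepA [] l = [] := by
  simp only [pvStepA, hc, hb, Bool.false_eq_true, if_false]
  rfl

theorem pvStepA_nil_nonblank (l : String)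
    (hc : PySem.Str.startswith (PySem.Str.strip l) "#" = false)
    (hb : (PySem.Str.strip l == "") = false) :
    pvStepA [] l = [l] := by
  simp only [pvStepA, hc, hb, Bool.false_eq_true, if_false, Bool.false_and, List.nil_append]

-- once the accumulator is nonempty, A's loop appends exactly the non-comment lines
theorem pvFold_ne_nil (ls : List String) (acc : List String) (h : acc ≠ []) :
    ls.foldl pvStepA acc
      = acc ++ ls.filter (fun line => !(PySem.Str.startswith (PySem.Str.strip line) "#")) := by
  induction ls generalizing acc with
  | nil => simp
  | cons l rest ih =>
    rw [List.foldl_cons, List.filter_cons]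
    by_cases hc : PySem.Str.startswith (PySem.Str.strip l) "#" = true
    · rw [pvStepA_comment acc l hc, ih acc h]
      simp only [hc, Bool.not_true, Bool.false_eq_true, if_false]
    · have hc' := Bool.eq_false_iff.mpr hc
      rw [pvStepA_keep acc l hc' h, ih _ (by simp)]
      simp only [hc', Bool.not_false, if_true, List.append_assoc, List.singleton_append]
  -- note: the filter's lambda gets normalised by simp's Str→Chars bridge lemmas; that is fine,
  -- both sides normalise identically

-- from the empty accumulator, A's loop computes B's drop-leading-blank of the filter
theorem pvFold_nil (ls : List String) :
    ls.foldl pvStepA []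
      = pvDropLeadingBlank (ls.filter (fun line => !(PySem.Str.startswith (PySem.Str.strip line) "#"))) := by
  induction ls with
  | nil => simp [pvDropLeadingBlank]
  | cons l rest ih =>
    rw [List.foldl_cons, List.filter_cons]
    by_cases hc : PySem.Str.startswith (PySem.Str.strip l) "#" = true
    · rw [pvStepA_comment [] l hc, ih]
      simp only [hc, Bool.not_true, Bool.false_eq_true, if_false]
    · have hc' := Bool.eq_false_iff.mpr hc
      have hnc : (!PySem.Str.startswith (PySem.Str.strip l) "#") = true := by
        rw [hc']; rfl
      by_cases hb : (PySem.Str.strip l == "") = true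
      · rw [pvStepA_nil_blank l hc' hb, ih, if_pos hnc, pvDropLeadingBlank]
        simp only [hb, if_true]
      · have hb' := Bool.eq_false_iff.mpr hb
        rw [pvStepA_nil_nonblank l hc' hb', pvFold_ne_nil rest [l] (by simp),
          if_pos hnc, pvDropLeadingBlank]
        simp only [hb', Bool.false_eq_true, if_false, List.singleton_append]

-- ===== VERDICT (by name: the statement is the Claim_ definition above) =====
theorem preprocess_csv_content_spec : Claim_equal_preprocess_csv_content := by
  intro s _
  unfold Spec_preprocess_csv_content preprocess_csv_content preprocess_csv_content_alt
  exact congrArg (PySem.Str.join "\n") (pvFold_nil _)
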